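-- pv_equiv track=rewrite | github.com/chrisjdavie/hackerrank | datastructures/queues/down_to_zero/failed_top_down/atf_bk.py | all_two_factors
-- ===== SOURCE A (Python) =====
-- from functools import reduce
-- from operator import mul
-- from itertools import product, compress
--
-- class TooFewError(ValueError):
--     pass
--
-- def all_two_factors(prime_factors):
--
--     if len(prime_factors) < 2:
--        raise TooFewError
--
--     factors = set()
--
--     for bools in product([True, False], repeat=len(prime_factors)):
--         if all(bools) or not(any(bools)):
--             continue
--
--         f0 = list(compress(prime_factors,bools))
--         f0 = reduce(mul, f0)
--
--         not_bools = [ not x for x in bools ]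
--         f1 = list(compress(prime_factors,not_bools))
--         f1 = reduce(mul, f1)
--         factors.add((min(f0,f1),max(f0,f1)))
--
--     return factors
-- ===== SOURCE B (Python) =====
-- class TooFewError(ValueError):
--     pass
--
-- def all_two_factors(prime_factors):
--     if len(prime_factors) < 2:
--         raise TooFewError
--
--     # Build the (product-of-group0, product-of-group1) pair for every split by
--     # sharing common prefixes: one pass over the factor list doubling the pair
--     # table, instead of re-multiplying each group from scratch per bitmask.
--     def splits(ps):
--         if not ps:
--             return [(1, 1)]
--         p = ps[0]
--         rest = splits(ps[1:])
--         return [(a * p, b) for a, b in rest] + [(a, b * p) for a, b in rest]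
--
--     pairs = splits(prime_factors)[1:-1]  # drop the two trivial splits (all/none)
--
--     factors = set()
--     for a, b in pairs:
--         factors.add((min(a, b), max(a, b)))
--     return factors
-- ===== Notes on version B (the rewrite author's own statement) =====
-- stated objective: alternative
-- what changed: B builds all (group0,group1) product pairs by a prefix-sharing doubling recursion (two multiplications per split) and trims the two trivial splits, instead of enumerating boolean masks and recomputing each group's product with compress+reduce per mask.
import Mathlib
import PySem

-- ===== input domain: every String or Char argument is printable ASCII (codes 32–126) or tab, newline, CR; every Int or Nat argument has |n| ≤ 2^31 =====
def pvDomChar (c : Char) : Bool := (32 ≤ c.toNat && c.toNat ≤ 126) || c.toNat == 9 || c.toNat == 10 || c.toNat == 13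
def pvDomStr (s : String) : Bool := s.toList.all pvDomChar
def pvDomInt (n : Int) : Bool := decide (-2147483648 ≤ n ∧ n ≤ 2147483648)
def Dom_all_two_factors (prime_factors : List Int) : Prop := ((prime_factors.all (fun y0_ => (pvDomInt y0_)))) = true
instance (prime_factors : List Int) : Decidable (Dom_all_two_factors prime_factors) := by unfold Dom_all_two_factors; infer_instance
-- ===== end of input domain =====

-- B replaces A's per-bitmask compress+reduce product recomputation by a prefix-sharing
-- doubling recursion over the factor list (an alternative algorithm, fewer multiplications).

-- ===== PORT A =====
-- product([True, False], repeat=n), first coordinate varies slowest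
def prodTF : Nat → List (List Bool)
  | 0 => [[]]
  | n + 1 => ((prodTF n).map (fun bs => true :: bs)) ++ ((prodTF n).map (fun bs => false :: bs))

-- itertools.compress(data, selectors): stops at the shorter of the two
def pyCompress : List Int → List Bool → List Int
  | x :: xs, b :: bs => if b then x :: pyCompress xs bs else pyCompress xs bs
  | _, _ => []

-- reduce(mul, l); [] raises TypeError in Python, unreachable here (guarded by the any/all skip)
def reduceMul : List Int → Int
  | [] => 0
  | h :: t => t.foldl (· * ·) h

def all_two_factors (prime_factors : List Int) : List (Int × Int) :=
  if prime_factors.length < 2 then []  -- raise TooFewError; excluded by Pre_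
  else
    (prodTF prime_factors.length).foldl
      (fun factors bools =>
        if bools.all (fun x => x) || !(bools.any (fun x => x)) then factors
        else
          let f0 := reduceMul (pyCompress prime_factors bools)
          let not_bools := bools.map (fun x => !x)
          let f1 := reduceMul (pyCompress prime_factors not_bools)
          PySem.Set.add factors (min f0 f1, max f0 f1))
      PySem.Set.empty

-- ===== PORT B =====
def splitsB : List Int → List (Int × Int)
  | [] => [(1, 1)]
  | p :: ps =>
    let rest := splitsB ps
    (rest.map (fun ab => (ab.1 * p, ab.2))) ++ (rest.map (fun ab => (ab.1, ab.2 * p)))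

def all_two_factors_alt (prime_factors : List Int) : List (Int × Int) :=
  if prime_factors.length < 2 then []  -- raise TooFewError; excluded by Pre_
  else
    -- xs[1:-1] = (xs.drop 1).dropLast, exact for every list
    let pairs := ((splitsB prime_factors).drop 1).dropLast
    pairs.foldl (fun factors ab => PySem.Set.add factors (min ab.1 ab.2, max ab.1 ab.2))
      PySem.Set.empty

-- ===== PRECONDITION & SPEC =====
-- A raises TooFewError on lists of fewer than two factors; excluded.
def Pre_all_two_factors (prime_factors : List Int) : Prop := 2 ≤ prime_factors.length
instance (prime_factors : List Int) : Decidable (Pre_all_two_factors prime_factors) := by unfold Pre_all_two_factors; infer_instance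
def pvWitness_all_two_factors : List Int := [2, 3, 5]

def Spec_all_two_factors (prime_factors : List Int) (out : List (Int × Int)) : Prop := out = all_two_factors_alt prime_factors
instance (prime_factors : List Int) (out : List (Int × Int)) : Decidable (Spec_all_two_factors prime_factors out) := by unfold Spec_all_two_factors; infer_instance

-- ===== CLAIM (what is proved, stated in full; the proofs are below) =====
def Claim_equal_all_two_factors : Prop := ∀ (prime_factors : List Int), Dom_all_two_factors prime_factors → Pre_all_two_factors prime_factors → Spec_all_two_factors prime_factors (all_two_factors prime_factors)

-- ===== LEMMAS AND PROOFS =====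

-- the (f0, f1) value A derives from a selector tuple, with plain list products
def pairOf (pf : List Int) (bs : List Bool) : Int × Int :=
  ((pyCompress pf bs).prod, (pyCompress pf (bs.map (fun x => !x))).prod)

theorem mem_prodTF_length {n : Nat} {bs : List Bool} (h : bs ∈ prodTF n) : bs.length = n := by
  induction n generalizing bs with
  | zero => simp [prodTF] at h; simp [h]
  | succ n ih =>
    simp only [prodTF, List.mem_append, List.mem_map] at h
    rcases h with ⟨bs', h', rfl⟩ | ⟨bs', h', rfl⟩ <;> simp [ih h']

theorem length_prodTF (n : Nat) : (prodTF n).length = 2 ^ n := by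
  induction n with
  | zero => simp [prodTF]
  | succ n ih => simp [prodTF, ih, Nat.pow_succ]; ring

theorem prodTF_ne_nil (n : Nat) : prodTF n ≠ [] := by
  intro h
  have h1 := length_prodTF n
  have h2 := Nat.two_pow_pos n
  rw [h] at h1
  simp at h1
  omega

theorem prodTF_head (n : Nat) : ∃ t, prodTF n = List.replicate n true :: t := by
  induction n with
  | zero => exact ⟨[], rfl⟩
  | succ n ih =>
    obtain ⟨t, ht⟩ := ih
    exact ⟨t.map (fun bs => true :: bs) ++ (prodTF n).map (fun bs => false :: bs),
      by simp [prodTF, ht, List.replicate_succ]⟩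

theorem foldl_mul_eq_prod (t : List Int) (h : Int) : t.foldl (· * ·) h = h * t.prod := by
  induction t generalizing h with
  | nil => simp
  | cons x t ih => simp [List.foldl_cons, ih (h * x), mul_assoc]

theorem reduceMul_eq_prod {l : List Int} (h : l ≠ []) : reduceMul l = l.prod := by
  cases l with
  | nil => exact absurd rfl h
  | cons x t => simp [reduceMul, foldl_mul_eq_prod]

theorem pyCompress_ne_nil {pf : List Int} {bs : List Bool} (hl : bs.length = pf.length)
    (h : bs.any (fun x => x) = true) : pyCompress pf bs ≠ [] := by
  induction pf generalizing bs with
  | nil => simp at hl; simp [hl] at h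
  | cons p pf ih =>
    cases bs with
    | nil => simp at hl
    | cons b bs =>
      simp only [List.length_cons, Nat.succ_inj] at hl
      cases b with
      | true => simp [pyCompress]
      | false =>
        simp only [List.any_cons, Bool.false_or] at h
        simpa [pyCompress] using ih hl h

-- B's doubling recursion computes exactly the (f0, f1) pair A derives from each selector tuple
theorem splitsB_eq_map (pf : List Int) :
    splitsB pf = (prodTF pf.length).map (pairOf pf) := by
  induction pf with
  | nil => simp [splitsB, prodTF, pairOf, pyCompress]
  | cons p pf ih =>
    simp only [splitsB, List.length_cons, prodTF, List.map_append, List.map_map, ih]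
    congr 1 <;> apply List.map_congr_left <;> intro bs _ <;>
      simp [Function.comp, pairOf, pyCompress, mul_comm]

-- the unique all-true selector tuple is the head of the enumeration
theorem filter_not_all (n : Nat) :
    (prodTF n).filter (fun bs => !(bs.all (fun x => x))) = (prodTF n).drop 1 := by
  induction n with
  | zero => simp [prodTF]
  | succ n ih =>
    have h1 : 1 ≤ ((prodTF n).map (fun bs => true :: bs)).length := by
      simpa using Nat.one_le_iff_ne_zero.mpr (by simpa using prodTF_ne_nil n)
    simp only [prodTF, List.filter_append, List.drop_append_of_le_length h1,
      List.filter_map]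
    congr 1
    · rw [← List.map_drop, ← ih]
      exact congrArg _ (List.filter_congr (fun bs _ => by simp [Function.comp]))
    · rw [List.filter_eq_self.mpr (fun bs _ => by simp [Function.comp])]

-- the unique all-false selector tuple is the last of the enumeration
theorem filter_any (n : Nat) :
    (prodTF n).filter (fun bs => bs.any (fun x => x)) = (prodTF n).dropLast := by
  induction n with
  | zero => simp [prodTF]
  | succ n ih =>
    have hne : (prodTF n).map (fun bs => false :: bs) ≠ [] := by
      simpa using prodTF_ne_nil n
    simp only [prodTF, List.filter_append, List.dropLast_append_of_ne_nil hne,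
      List.filter_map]
    congr 1
    · rw [List.filter_eq_self.mpr (fun bs _ => by simp [Function.comp])]
    · rw [← List.map_dropLast, ← ih]
      exact congrArg _ (List.filter_congr (fun bs _ => by simp [Function.comp]))

-- the proper splits are exactly the enumeration without its first and last tuples
theorem filter_proper (n : Nat) (hn : 1 ≤ n) :
    (prodTF n).filter (fun bs => !(bs.all (fun x => x)) && bs.any (fun x => x)) =
      ((prodTF n).drop 1).dropLast := by
  rw [show (fun bs => !(bs.all (fun x => x)) && bs.any (fun x => x)) =
      (fun (bs : List Bool) => bs.any (fun x => x) && !(bs.all (fun x => x))) from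
    funext fun bs => Bool.and_comm .., ← List.filter_filter, filter_not_all]
  obtain ⟨t, ht⟩ := prodTF_head n
  have hh : (List.replicate n true).any (fun x => x) = true := by
    cases n with
    | zero => omega
    | succ m => simp [List.replicate_succ]
  have hlt : t ≠ [] := by
    intro hnil
    have := length_prodTF n
    rw [ht, hnil] at this
    simp at this
    have h2 : 2 ≤ 2 ^ n := by
      calc 2 = 2 ^ 1 := rfl
        _ ≤ 2 ^ n := Nat.pow_le_pow_right (by omega) hn
    omega
  have := filter_any n
  rw [ht, List.filter_cons, hh, List.dropLast_cons_of_ne_nil hlt] at this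
  simp only [if_true, List.cons.injEq, true_and] at this
  rw [ht, List.drop_one, List.tail_cons, this]

theorem all_two_factors_eq_alt (pf : List Int) (hpre : 2 ≤ pf.length) :
    all_two_factors pf = all_two_factors_alt pf := by
  have hn : ¬ pf.length < 2 := by omega
  unfold all_two_factors all_two_factors_alt
  rw [if_neg hn, if_neg hn]
  have hbody : (fun (factors : List (Int × Int)) (bools : List Bool) =>
        if bools.all (fun x => x) || !(bools.any (fun x => x)) then factors
        else
          let f0 := reduceMul (pyCompress pf bools)
          let not_bools := bools.map (fun x => !x)
          let f1 := reduceMul (pyCompress pf not_bools)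
          PySem.Set.add factors (min f0 f1, max f0 f1)) =
      (fun (factors : List (Int × Int)) (bools : List Bool) =>
        if (!(bools.all (fun x => x)) && bools.any (fun x => x)) = true then
          PySem.Set.add factors
            (min (reduceMul (pyCompress pf bools))
                (reduceMul (pyCompress pf (bools.map (fun x => !x)))),
             max (reduceMul (pyCompress pf bools))
                (reduceMul (pyCompress pf (bools.map (fun x => !x))))) else factors) := by
    funext factors bools
    cases hall : bools.all (fun x => x) <;> cases hany : bools.any (fun x => x) <;> simp
  rw [hbody, ← List.foldl_filter, filter_proper pf.length (by omega)]
  simp only [splitsB_eq_map, ← List.map_drop, ← List.map_dropLast, List.foldl_map]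
  apply PySem.List.foldl_congr_mem
  intro s bs hmem
  have hmem' : bs ∈ prodTF pf.length := by
    have hsub := (List.dropLast_sublist ((prodTF pf.length).drop 1)).trans
      (List.drop_sublist 1 (prodTF pf.length))
    exact hsub.mem hmem
  have hlen : bs.length = pf.length := mem_prodTF_length hmem'
  have hfp : bs ∈ (prodTF pf.length).filter
      (fun bs => !(bs.all (fun x => x)) && bs.any (fun x => x)) := by
    rw [filter_proper pf.length (by omega)]; exact hmem
  have hprop := List.of_mem_filter hfp
  simp only [Bool.and_eq_true, Bool.not_eq_true'] at hprop
  have hany : bs.any (fun x => x) = true := hprop.2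
  have hanynot : (bs.map (fun x => !x)).any (fun x => x) = true := by
    rcases List.all_eq_false.mp hprop.1 with ⟨x, hx, hxf⟩
    refine List.any_eq_true.mpr ⟨!x, List.mem_map_of_mem hx, ?_⟩
    simp only [Bool.not_eq_true] at hxf
    simp [hxf]
  rw [pairOf, reduceMul_eq_prod (pyCompress_ne_nil hlen hany),
    reduceMul_eq_prod (pyCompress_ne_nil (by simpa using hlen) hanynot)]

-- ===== VERDICT (by name: the statement is the Claim_ definition above) =====
theorem all_two_factors_spec : Claim_equal_all_two_factors := by
  intro pf _ hpre
  exact all_two_factors_eq_alt pf hpre
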